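-- pv_equiv track=rewrite | github.com/yuping3252/CodeDataSearchEngine | tables/tableview.py | col_group_boundary
-- ===== SOURCE A (Python) =====
-- def col_group_boundary(col_lst):
--     bndry1 = []
--     bndry2 = []
--
--     b    = 0
--     tlen = 0
--     len_ = 0
--     for cols in col_lst:
--         bndry1.append(b)
--         b += len(cols)
--         bndry2.append(b)
--         len_ += len(cols)
--         tlen += 1
--     return tlen, len_, bndry1, bndry2
-- ===== SOURCE B (Python) =====
-- def col_group_boundary(col_lst):
--     L = [len(cols) for cols in col_lst]
--     bndry1 = [sum(L[:i]) for i in range(len(L))]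
--     bndry2 = [sum(L[:i + 1]) for i in range(len(L))]
--     return len(L), sum(L), bndry1, bndry2
-- ===== Notes on version B (the rewrite author's own statement) =====
-- stated objective: alternative
-- what changed: B abandons A's single stateful pass with five accumulators and instead computes each boundary independently by a closed-form prefix sum: bndry1[i] = sum(L[:i]) and bndry2[i] = sum(L[:i+1]) over the length list L, with totals len(L) and sum(L); it trades A's O(n) accumulation for declarative O(n^2) per-index sums.
import Mathlib
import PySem

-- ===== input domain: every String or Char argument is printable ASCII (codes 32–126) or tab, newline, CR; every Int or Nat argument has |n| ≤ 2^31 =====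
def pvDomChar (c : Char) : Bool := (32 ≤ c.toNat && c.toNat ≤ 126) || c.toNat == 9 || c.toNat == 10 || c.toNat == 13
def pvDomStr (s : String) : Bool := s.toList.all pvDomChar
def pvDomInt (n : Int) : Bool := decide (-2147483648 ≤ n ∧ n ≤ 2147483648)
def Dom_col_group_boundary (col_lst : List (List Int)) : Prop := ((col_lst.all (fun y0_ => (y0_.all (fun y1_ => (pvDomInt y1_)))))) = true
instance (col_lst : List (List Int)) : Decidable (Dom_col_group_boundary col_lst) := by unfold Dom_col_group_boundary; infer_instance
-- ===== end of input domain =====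

-- B computes each boundary independently as a closed-form prefix sum over the length
-- list (bndry1[i] = sum(L[:i]), bndry2[i] = sum(L[:i+1])) instead of A's stateful
-- five-accumulator loop; objective: alternative (declarative O(n^2) vs A's O(n)).


-- ===== PORT A =====
-- state = (bndry1, bndry2, b, tlen, len_), exactly A's loop variables
def col_group_boundary (col_lst : List (List Int)) : Int × Int × List Int × List Int :=
  let st := col_lst.foldl
    (fun (st : List Int × List Int × Int × Int × Int) cols =>
      (st.1 ++ [st.2.2.1],
       st.2.1 ++ [st.2.2.1 + (cols.length : Int)],
       st.2.2.1 + (cols.length : Int),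
       st.2.2.2.1 + 1,
       st.2.2.2.2 + (cols.length : Int)))
    ([], [], 0, 0, 0)
  (st.2.2.2.1, st.2.2.2.2, st.1, st.2.1)

-- ===== PORT B =====
-- L[:i] for 0 ≤ i is exactly List.take i; range(len(L)) is List.range; sum is List.sum
def col_group_boundary_alt (col_lst : List (List Int)) : Int × Int × List Int × List Int :=
  let L := col_lst.map (fun cols => (cols.length : Int))
  let bndry1 := (List.range L.length).map (fun i => (L.take i).sum)
  let bndry2 := (List.range L.length).map (fun i => (L.take (i + 1)).sum)
  ((L.length : Int), L.sum, bndry1, bndry2)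

-- ===== PRECONDITION & SPEC =====
def Spec_col_group_boundary (col_lst : List (List Int)) (out : Int × Int × List Int × List Int) : Prop := out = col_group_boundary_alt col_lst
instance (col_lst : List (List Int)) (out : Int × Int × List Int × List Int) : Decidable (Spec_col_group_boundary col_lst out) := by unfold Spec_col_group_boundary; infer_instance

-- ===== CLAIM (what is proved, stated in full; the proofs are below) =====
def Claim_equal_col_group_boundary : Prop := ∀ (col_lst : List (List Int)), Dom_col_group_boundary col_lst → Spec_col_group_boundary col_lst (col_group_boundary col_lst)

-- ===== LEMMAS AND PROOFS =====

-- before-group offsets starting from b (A's bndry1)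
def pvPrefs1 (b : Int) : List (List Int) → List Int
  | [] => []
  | c :: cs => b :: pvPrefs1 (b + (c.length : Int)) cs

-- after-group cumulative offsets starting from b (A's bndry2)
def pvPrefs2 (b : Int) : List (List Int) → List Int
  | [] => []
  | c :: cs => (b + (c.length : Int)) :: pvPrefs2 (b + (c.length : Int)) cs

def pvSumLen (cs : List (List Int)) : Int := (cs.map (fun c => (c.length : Int))).sum

lemma pvFoldA (cs : List (List Int)) : ∀ (b1 b2 : List Int) (b t l : Int),
    cs.foldl
      (fun (st : List Int × List Int × Int × Int × Int) cols =>
        (st.1 ++ [st.2.2.1],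
         st.2.1 ++ [st.2.2.1 + (cols.length : Int)],
         st.2.2.1 + (cols.length : Int),
         st.2.2.2.1 + 1,
         st.2.2.2.2 + (cols.length : Int)))
      (b1, b2, b, t, l)
    = (b1 ++ pvPrefs1 b cs, b2 ++ pvPrefs2 b cs, b + pvSumLen cs,
       t + (cs.length : Int), l + pvSumLen cs) := by
  induction cs with
  | nil => intro b1 b2 b t l; simp [pvPrefs1, pvPrefs2, pvSumLen]
  | cons c cs ih =>
      intro b1 b2 b t l
      simp only [List.foldl_cons, ih, pvPrefs1, pvPrefs2, pvSumLen, List.map_cons,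
        List.sum_cons, List.length_cons, List.append_assoc, List.singleton_append,
        Prod.mk.injEq]
      refine ⟨trivial, trivial, by ring, by push_cast; ring, by ring⟩

lemma pvPrefs1_eq_map (cs : List (List Int)) : ∀ (b : Int),
    pvPrefs1 b cs
      = (List.range cs.length).map
          (fun i => b + ((cs.map (fun c => (c.length : Int))).take i).sum) := by
  induction cs with
  | nil => intro b; simp [pvPrefs1]
  | cons c cs ih =>
      intro b
      simp only [pvPrefs1, ih, List.length_cons, List.range_succ_eq_map, List.map_cons,
        List.map_map, Function.comp_def, List.take_succ_cons, List.sum_cons,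
        List.take_zero, List.sum_nil]
      exact List.cons_eq_cons.mpr ⟨by ring, List.map_congr_left fun i _ => by ring⟩

lemma pvPrefs2_eq_map (cs : List (List Int)) : ∀ (b : Int),
    pvPrefs2 b cs
      = (List.range cs.length).map
          (fun i => b + ((cs.map (fun c => (c.length : Int))).take (i + 1)).sum) := by
  induction cs with
  | nil => intro b; simp [pvPrefs2]
  | cons c cs ih =>
      intro b
      simp only [pvPrefs2, ih, List.length_cons, List.range_succ_eq_map, List.map_cons,
        List.map_map, Function.comp_def, List.take_succ_cons, List.sum_cons,
        List.take_zero, List.sum_nil]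
      exact List.cons_eq_cons.mpr ⟨by ring, List.map_congr_left fun i _ => by ring⟩

-- ===== VERDICT (by name: the statement is the Claim_ definition above) =====
theorem col_group_boundary_spec : Claim_equal_col_group_boundary := by
  intro col_lst _
  unfold Spec_col_group_boundary col_group_boundary col_group_boundary_alt
  rw [pvFoldA]
  simp only [List.nil_append, pvPrefs1_eq_map, pvPrefs2_eq_map, pvSumLen,
    List.length_map, zero_add]
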